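-- pv_equiv track=rewrite | github.com/fernunex/Learn2code | 8_sets_and_dictionaries/06_marko.py | word_to_presses
-- ===== SOURCE A (Python) =====
-- def word_to_presses(word, KEYBOARD):
--     """
--     word is any string in lowercase.
--     KEYBOARD is a dictionary where key are the letters and the value
--     is the keyboard key asigned to those letters.
--
--     Retruns a list of keyboard key for each letter of the word (maps
--     from letters to numbers).
--     """
--     code_number = []
--     for lettter in word:
--         for key in KEYBOARD:
--             if lettter in key:
--                 code_number.append(KEYBOARD[key])
--                 break
--     return code_number
-- ===== SOURCE B (Python) =====
-- def word_to_presses(word, KEYBOARD):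
--     index = {}
--     for key, value in KEYBOARD.items():
--         for ch in key:
--             index.setdefault(ch, value)
--     return [index[ch] for ch in word if ch in index]
-- ===== Notes on version B (the rewrite author's own statement) =====
-- stated objective: idiomatic
-- what changed: B builds an inverted char->value index once (setdefault keeps the first-matching key) and then maps each letter with a single dict lookup, instead of rescanning every keyboard key for every letter.
import Mathlib
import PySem

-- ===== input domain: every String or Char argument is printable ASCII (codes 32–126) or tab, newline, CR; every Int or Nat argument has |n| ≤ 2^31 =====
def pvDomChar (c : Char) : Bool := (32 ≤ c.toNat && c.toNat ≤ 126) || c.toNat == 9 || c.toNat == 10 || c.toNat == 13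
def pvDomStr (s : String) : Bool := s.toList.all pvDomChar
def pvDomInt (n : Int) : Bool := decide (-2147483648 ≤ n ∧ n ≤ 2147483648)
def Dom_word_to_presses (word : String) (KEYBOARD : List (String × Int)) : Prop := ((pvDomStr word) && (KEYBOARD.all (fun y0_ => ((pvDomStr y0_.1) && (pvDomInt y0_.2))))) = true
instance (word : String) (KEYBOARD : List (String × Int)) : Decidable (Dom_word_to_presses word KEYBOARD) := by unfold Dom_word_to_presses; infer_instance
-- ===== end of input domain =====

-- B replaces A's per-letter scan of all keyboard keys by one inverted char→value
-- index built up front (setdefault = first match wins) and per-letter dict lookups (objective: idiomatic).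

-- ===== PORT A =====
-- inner 'for key in KEYBOARD: if lettter in key: append(KEYBOARD[key]); break'.
-- 'lettter in key' for a 1-char string is exactly char membership; KEYBOARD[key] is d.get? k.
def wtpInnerA (d : PySem.Dict String Int) (c : Char) : List String → Option Int
  | [] => none
  | k :: rest => if k.toList.contains c then d.get? k else wtpInnerA d c rest

def word_to_presses (word : String) (KEYBOARD : List (String × Int)) : List Int :=
  let d := PySem.Dict.ofList KEYBOARD   -- the Python parameter is a dict
  word.toList.foldl (fun acc c =>
    match wtpInnerA d c d.keys with
    | some v => acc ++ [v]    -- the lookup always succeeds (key taken from d.keys)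
    | none => acc) []

-- ===== PORT B =====
-- index = {}; for key, value in KEYBOARD.items(): for ch in key: index.setdefault(ch, value)
def wtpIndex (items : List (String × Int)) : PySem.Dict Char Int :=
  items.foldl (fun d p => p.1.toList.foldl (fun d ch => d.setdefault ch p.2) d) PySem.Dict.empty

-- [index[ch] for ch in word if ch in index]
def word_to_presses_alt (word : String) (KEYBOARD : List (String × Int)) : List Int :=
  let idx := wtpIndex (PySem.Dict.ofList KEYBOARD).items
  word.toList.filterMap (fun c => idx.get? c)

-- ===== PRECONDITION & SPEC =====
def Spec_word_to_presses (word : String) (KEYBOARD : List (String × Int)) (out : List Int) : Prop := out = word_to_presses_alt word KEYBOARD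
instance (word : String) (KEYBOARD : List (String × Int)) (out : List Int) : Decidable (Spec_word_to_presses word KEYBOARD out) := by unfold Spec_word_to_presses; infer_instance

-- ===== CLAIM (what is proved, stated in full; the proofs are below) =====
def Claim_equal_word_to_presses : Prop := ∀ (word : String) (KEYBOARD : List (String × Int)), Dom_word_to_presses word KEYBOARD → Spec_word_to_presses word KEYBOARD (word_to_presses word KEYBOARD)

-- ===== LEMMAS AND PROOFS =====

-- A's inner scan over the key list returns the value of the first key containing c.
lemma wtpInnerA_eq (c : Char) : ∀ (L : List (String × Int)) (d : PySem.Dict String Int),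
    (∀ p ∈ L, d.get? p.1 = some p.2) →
    wtpInnerA d c (L.map Prod.fst) = (L.find? (fun p => p.1.toList.contains c)).map Prod.snd := by
  intro L
  induction L with
  | nil => intro d _; simp [wtpInnerA]
  | cons p rest ih =>
    intro d h
    simp only [List.map_cons, wtpInnerA, List.find?]
    by_cases hc : c ∈ p.1.toList
    · simp [hc, h p (by simp)]
    · simpa [hc] using ih d (fun q hq => h q (by simp [hq]))

-- B's inner fold over one key's characters: existing entries win, else first key containing c.
lemma wtpSetdefault_fold_get? (c : Char) (v : Int) : ∀ (chars : List Char) (d : PySem.Dict Char Int),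
    ((chars.foldl (fun d ch => d.setdefault ch v) d).get? c) =
      ((d.get? c).orElse (fun _ => if chars.contains c then some v else none)) := by
  intro chars
  induction chars with
  | nil => intro d; cases h : d.get? c <;> simp [Option.orElse, h]
  | cons ch rest ih =>
    intro d
    rw [List.foldl_cons, ih]
    by_cases hc : c = ch
    · subst hc
      rw [PySem.Dict.get?_setdefault_self d c v]
      cases h : d.get? c <;> simp [Option.orElse, h]
    · rw [PySem.Dict.get?_setdefault_of_ne d v hc]
      cases h : d.get? c <;> simp [Option.orElse, hc]

-- B's outer fold over the items: lookup = value of the first item whose key contains c.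
lemma wtpIndex_from_get? (c : Char) : ∀ (L : List (String × Int)) (d : PySem.Dict Char Int),
    ((L.foldl (fun d p => p.1.toList.foldl (fun d ch => d.setdefault ch p.2) d) d).get? c) =
      ((d.get? c).orElse (fun _ => (L.find? (fun p => p.1.toList.contains c)).map Prod.snd)) := by
  intro L
  induction L with
  | nil => intro d; cases h : d.get? c <;> simp [Option.orElse, h]
  | cons p rest ih =>
    intro d
    rw [List.foldl_cons, ih, wtpSetdefault_fold_get?]
    by_cases hc : p.1.toList.contains c = true
    · replace hc : c ∈ p.1.toList := by simpa using hc
      cases h : d.get? c <;> simp [Option.orElse, hc, List.find?]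
    · replace hc : c ∉ p.1.toList := by simpa using hc
      cases h : d.get? c <;> simp [Option.orElse, hc, List.find?]

-- the append-accumulating fold is a filterMap
lemma wtpFoldl_filterMap (g : Char → Option Int) : ∀ (l : List Char) (acc : List Int),
    (l.foldl (fun acc c => match g c with | some v => acc ++ [v] | none => acc) acc) =
      acc ++ l.filterMap g := by
  intro l
  induction l with
  | nil => intro acc; simp
  | cons c rest ih =>
    intro acc
    cases h : g c <;> simp [List.foldl_cons, h, ih]

-- ===== VERDICT (by name: the statement is the Claim_ definition above) =====
theorem word_to_presses_spec : Claim_equal_word_to_presses := by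
  intro word KEYBOARD _
  unfold Spec_word_to_presses word_to_presses word_to_presses_alt wtpIndex
  rw [wtpFoldl_filterMap]
  simp only [List.nil_append]
  apply List.filterMap_congr
  intro c _
  have hdup := PySem.Dict.nodup_keys_ofList KEYBOARD
  have hkeys : (PySem.Dict.ofList KEYBOARD).keys = (PySem.Dict.ofList KEYBOARD).items.map Prod.fst := rfl
  rw [hkeys, wtpInnerA_eq c _ _ (fun p hp => PySem.Dict.get?_of_mem_items _ (by simpa using hp) hdup),
    wtpIndex_from_get?]
  simp [Option.orElse, PySem.Dict.get?_empty]
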